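-- pv_equiv track=rewrite | github.com/bzssm/UNSW-course-backup | COMP9021/Assignment/Assignment_1_Question_3.py | loop
-- ===== SOURCE A (Python) =====
-- word_to_value = {'a': 2, 'b': 5, 'c': 4, 'd': 4, 'e': 1, 'f': 6, \
--                  'g': 5, 'h': 5, 'i': 1, 'j': 7, 'k': 6, 'l': 3, \
--                  'm': 5, 'n': 2, 'o': 3, 'p': 5, 'q': 7, 'r': 2, \
--                  's': 1, 't': 2, 'u': 4, 'v': 6, 'w': 6, 'x': 7, \
--                  'y': 5, 'z': 7}
--
-- def value_cal(word, input_set):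
--     value = 0
--     for character in word:
--         if input_set.count(character) >= word.count(character) and character in input_set:
--             value += word_to_value[character]
--         else:
--             return False, 0
--     return True, value
--
-- def loop(words, input_set):
--     result_dic = dict()
--     for word in words:
--         flag, value = value_cal(word, input_set)
--         if flag == True:
--             result_dic[word] = value
--     if result_dic == {}:
--         return None, None
--     result_list = sorted(result_dic.items(), key=lambda d: d[1], reverse=True)
--     max_value = result_list[0][1]
--     max_value_word = [l[0] for l in result_list if l[1] == max_value]
--     return max_value_word, max_value
-- ===== SOURCE B (Python) =====
-- word_to_value = {'a': 2, 'b': 5, 'c': 4, 'd': 4, 'e': 1, 'f': 6, \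
--                  'g': 5, 'h': 5, 'i': 1, 'j': 7, 'k': 6, 'l': 3, \
--                  'm': 5, 'n': 2, 'o': 3, 'p': 5, 'q': 7, 'r': 2, \
--                  's': 1, 't': 2, 'u': 4, 'v': 6, 'w': 6, 'x': 7, \
--                  'y': 5, 'z': 7}
--
--
-- def loop(words, input_set):
--     # Count the available characters once, up front.
--     avail = {}
--     for c in input_set:
--         avail[c] = avail.get(c, 0) + 1
--     best = None
--     best_words = []
--     seen = set()
--     for word in words:
--         if word in seen:
--             continue
--         seen.add(word)
--         # Count the word's characters, then check buildability per distinct char.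
--         need = {}
--         for c in word:
--             need[c] = need.get(c, 0) + 1
--         total = 0
--         ok = True
--         for c, k in need.items():
--             if c not in word_to_value or avail.get(c, 0) < k:
--                 ok = False
--                 break
--             total += word_to_value[c] * k
--         if not ok:
--             continue
--         if best is None or total > best:
--             best = total
--             best_words = [word]
--         elif total == best:
--             best_words.append(word)
--     if best is None:
--         return None, None
--     return best_words, best
-- ===== Notes on version B (the rewrite author's own statement) =====
-- stated objective: faster
-- what changed: B counts input_set's characters once into a dict and checks each distinct word per distinct character against that counter (instead of A's repeated str.count scans per character of every word), and tracks the running best value and tie list in a single pass instead of sorting the dict items and filtering for the max.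
import Mathlib
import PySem

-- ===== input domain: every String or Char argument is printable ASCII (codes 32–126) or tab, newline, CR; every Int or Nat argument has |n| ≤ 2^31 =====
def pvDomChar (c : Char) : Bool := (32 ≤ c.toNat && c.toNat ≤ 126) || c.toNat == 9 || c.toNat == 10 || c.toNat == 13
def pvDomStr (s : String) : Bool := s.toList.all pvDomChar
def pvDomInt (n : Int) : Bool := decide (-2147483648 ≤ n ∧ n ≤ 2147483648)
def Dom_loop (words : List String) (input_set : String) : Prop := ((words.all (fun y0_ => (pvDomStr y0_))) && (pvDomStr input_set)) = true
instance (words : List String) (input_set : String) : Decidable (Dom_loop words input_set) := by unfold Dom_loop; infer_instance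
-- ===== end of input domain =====

-- B replaces A's per-character repeated .count scans and the final sort by one up-front
-- character counter for input_set, a per-word counter check, and a single running-max pass
-- over the distinct words (objective: faster; the equivalence is about return values only).

-- ===== PORT A =====
def wordToValue : PySem.Dict Char Int :=
  PySem.Dict.ofList [('a',2),('b',5),('c',4),('d',4),('e',1),('f',6),
    ('g',5),('h',5),('i',1),('j',7),('k',6),('l',3),
    ('m',5),('n',2),('o',3),('p',5),('q',7),('r',2),
    ('s',1),('t',2),('u',4),('v',6),('w',6),('x',7),
    ('y',5),('z',7)]

-- value_cal; `none` is exactly Python's KeyError (word_to_value[character] missing)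
def valueCalGo (ss ws : List Char) : List Char → Int → Option (Bool × Int)
  | [], value => some (true, value)
  | c :: rest, value =>
    if ss.count c ≥ ws.count c ∧ c ∈ ss then
      match wordToValue.get? c with
      | some v => valueCalGo ss ws rest (value + v)
      | none => none
    else some (false, 0)

def valueCal (word input_set : String) : Option (Bool × Int) :=
  valueCalGo input_set.toList word.toList word.toList 0

-- the result_dic-building for loop; `none` propagates value_cal's KeyError
def loopDic : List String → String → PySem.Dict String Int → Option (PySem.Dict String Int)
  | [], _, d => some d
  | w :: rest, s, d =>
    match valueCal w s with
    | none => none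
    | some (flag, value) => loopDic rest s (if flag then d.insert w value else d)

def loop (words : List String) (input_set : String) : Option (List String) × Option Int :=
  match loopDic words input_set PySem.Dict.empty with
  | none => (none, none)   -- unreachable under Pre_loop: Python raises KeyError here
  | some d =>
    if d.items = [] then (none, none)
    else
      match PySem.List.sorted d.items (fun p => p.2) true with
      | [] => (none, none)  -- unreachable: d.items ≠ []
      | (w0, m) :: t =>
        (some ((((w0, m) :: t).filter (fun p => p.2 == m)).map (fun p => p.1)), some m)

-- ===== PORT B =====
-- the avail/need counting loops of Source B
def countChars (cs : List Char) : PySem.Dict Char Int :=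
  cs.foldl (fun d c => d.insert c (d.getD c 0 + 1)) PySem.Dict.empty

-- the per-distinct-char buildability check of Source B (short-circuits like its `break`)
def checkNeed (avail : PySem.Dict Char Int) : List (Char × Int) → Int → Option Int
  | [], total => some total
  | (c, k) :: rest, total =>
    if wordToValue.contains c = false ∨ avail.getD c 0 < k then none
    else checkNeed avail rest (total + wordToValue.getD c 0 * k)

def loopAltGo (avail : PySem.Dict Char Int) :
    List String → PySem.Set String → Option Int → List String →
    Option (List String) × Option Int
  | [], _, best, bestWords =>
    match best with
    | none => (none, none)
    | some b => (some bestWords, some b)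
  | w :: rest, seen, best, bestWords =>
    if w ∈ seen then loopAltGo avail rest seen best bestWords
    else
      match checkNeed avail (countChars w.toList).items 0 with
      | none => loopAltGo avail rest (PySem.Set.add seen w) best bestWords
      | some total =>
        match best with
        | none => loopAltGo avail rest (PySem.Set.add seen w) (some total) [w]
        | some b =>
          if total > b then loopAltGo avail rest (PySem.Set.add seen w) (some total) [w]
          else if total = b then loopAltGo avail rest (PySem.Set.add seen w) best (bestWords ++ [w])
          else loopAltGo avail rest (PySem.Set.add seen w) best bestWords

def loop_alt (words : List String) (input_set : String) : Option (List String) × Option Int :=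
  loopAltGo (countChars input_set.toList) words PySem.Set.empty none []

-- ===== PRECONDITION & SPEC =====
def azB (c : Char) : Bool := decide ('a' ≤ c) && decide (c ≤ 'z')

-- A raises KeyError on a word exactly when its first non-lowercase character, and every
-- character before it, has at least as many copies in input_set as in the word.
def keyErrB (ws ss : List Char) : Bool :=
  !decide (ws.takeWhile azB = ws) &&
    (ws.take ((ws.takeWhile azB).length + 1)).all
      (fun c => decide (ws.count c ≤ ss.count c))


-- Pre_loop excludes exactly the inputs on which Python's A raises KeyError
-- (a word whose first non-a..z character passes the availability-count test).
def Pre_loop (words : List String) (input_set : String) : Prop :=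
  (words.all (fun w => !keyErrB w.toList input_set.toList)) = true

instance (words : List String) (input_set : String) : Decidable (Pre_loop words input_set) := by
  unfold Pre_loop; infer_instance

def pvWitness_loop : List String × String := (["ab", "zz!"], "ab")


def Spec_loop (words : List String) (input_set : String) (out : Option (List String) × Option Int) : Prop := out = loop_alt words input_set
instance (words : List String) (input_set : String) (out : Option (List String) × Option Int) : Decidable (Spec_loop words input_set out) := by unfold Spec_loop; infer_instance

-- ===== CLAIM (what is proved, stated in full; the proofs are below) =====
def Claim_equal_loop : Prop := ∀ (words : List String) (input_set : String), Dom_loop words input_set → Pre_loop words input_set → Spec_loop words input_set (loop words input_set)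

-- ===== LEMMAS AND PROOFS =====

-- Prop view of keyErrB, used throughout the proofs
def keyErr (ws ss : List Char) : Prop := keyErrB ws ss = true

-- spec-level view shared by both directions of the proof
def tv (c : Char) : Int := wordToValue.getD c 0

def buildable (ws ss : List Char) : Prop :=
  ∀ c ∈ ws, azB c = true ∧ ws.count c ≤ ss.count c

def valW (ws : List Char) : Int := (ws.map tv).sum

-- the post-loop extraction of A (identical to loop's some-branch)
def finalizeA (d : PySem.Dict String Int) : Option (List String) × Option Int :=
  if d.items = [] then (none, none)
  else
    match PySem.List.sorted d.items (fun p => p.2) true with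
    | [] => (none, none)
    | (w0, m) :: t =>
      (some ((((w0, m) :: t).filter (fun p => p.2 == m)).map (fun p => p.1)), some m)

-- ---- character-table facts ----
lemma az_mem_keys (c : Char) : c ∈ wordToValue.keys ↔ azB c = true := by
  have hk : wordToValue.keys = ['a','b','c','d','e','f','g','h','i','j','k','l','m','n','o','p','q','r','s','t','u','v','w','x','y','z'] := by decide
  constructor
  · intro h; rw [hk] at h; fin_cases h <;> decide
  · intro h
    have h1 : 97 ≤ c.toNat ∧ c.toNat ≤ 122 := by
      unfold azB at h
      simp only [Bool.and_eq_true, decide_eq_true_eq] at h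
      obtain ⟨ha, hb⟩ := h
      rw [Char.le_def, UInt32.le_iff_toNat_le] at ha hb
      exact ⟨ha, hb⟩
    have hc : Char.ofNat c.toNat = c := Char.ofNat_toNat c
    rw [hk, ← hc]
    obtain ⟨hl, hr⟩ := h1
    interval_cases h2 : c.toNat <;> decide

lemma get?_wordToValue_of_az (c : Char) (h : azB c = true) :
    wordToValue.get? c = some (tv c) := by
  have hmem : c ∈ wordToValue.keys := (az_mem_keys c).2 h
  have hcont : wordToValue.contains c = true := (PySem.Dict.contains_iff_mem_keys _ _).2 hmem
  rw [PySem.Dict.contains_eq_isSome_get?] at hcont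
  cases hg : wordToValue.get? c with
  | none => rw [hg] at hcont; simp at hcont
  | some v =>
    have : tv c = v := by rw [tv, PySem.Dict.getD_eq_get?_getD, hg]; rfl
    rw [this]

lemma contains_wordToValue (c : Char) : wordToValue.contains c = azB c := by
  by_cases h : azB c = true
  · rw [h]; exact (PySem.Dict.contains_iff_mem_keys _ _).2 ((az_mem_keys c).2 h)
  · simp only [Bool.not_eq_true] at h
    rw [h]
    by_contra hc
    simp only [Bool.not_eq_false] at hc
    have := (az_mem_keys c).1 ((PySem.Dict.contains_iff_mem_keys _ _).1 hc)
    rw [h] at this; exact Bool.false_ne_true this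

-- ---- A side: value_cal characterised ----
lemma go_spec (ss ws : List Char) (hk : ¬ keyErr ws ss) :
    ∀ (cs : List Char) (acc : Int) (pre : List Char), ws = pre ++ cs →
      (∀ c ∈ pre, azB c = true ∧ ws.count c ≤ ss.count c ∧ c ∈ ss) →
      valueCalGo ss ws cs acc =
        if ∀ c ∈ cs, azB c = true ∧ (ss.count c ≥ ws.count c ∧ c ∈ ss)
        then some (true, acc + (cs.map tv).sum) else some (false, 0) := by
  intro cs
  induction cs with
  | nil => intro acc pre _ _; simp [valueCalGo]
  | cons c rest ih =>
    intro acc pre hws hpre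
    by_cases hP : ss.count c ≥ ws.count c ∧ c ∈ ss
    · by_cases haz : azB c = true
      · rw [valueCalGo, if_pos hP, get?_wordToValue_of_az c haz]
        show valueCalGo ss ws rest (acc + tv c) = _
        rw [ih (acc + tv c) (pre ++ [c]) (by rw [hws]; simp)
              (by intro x hx
                  rcases List.mem_append.1 hx with h | h
                  · exact hpre x h
                  · simp at h; subst h; exact ⟨haz, hP.1, hP.2⟩)]
        by_cases hrest : ∀ x ∈ rest, azB x = true ∧ (ss.count x ≥ ws.count x ∧ x ∈ ss)
        · rw [if_pos hrest, if_pos (by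
            intro x hx
            rcases List.mem_cons.1 hx with h | h
            · subst h; exact ⟨haz, hP⟩
            · exact hrest x h)]
          simp [add_assoc]
        · rw [if_neg hrest, if_neg (by
            intro hall
            exact hrest fun x hx => hall x (List.mem_cons_of_mem _ hx))]
      · exfalso
        apply hk
        have haz' : azB c = false := by simpa using haz
        have htw : ws.takeWhile azB = pre := by
          rw [hws, List.takeWhile_append]
          rw [List.takeWhile_eq_self_iff.2 (fun x hx => (hpre x hx).1)]
          simp [List.takeWhile_cons_of_neg, haz']
        unfold keyErr keyErrB
        rw [htw]
        simp only [Bool.and_eq_true, Bool.not_eq_true', decide_eq_false_iff_not,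
          List.all_eq_true, decide_eq_true_eq]
        constructor
        · rw [hws]; simp
        · have htake : List.take (pre.length + 1) ws = pre ++ [c] := by
            rw [hws, List.take_append]; simp
          rw [htake]
          intro x hx
          rcases List.mem_append.1 hx with h | h
          · exact (hpre x h).2.1
          · simp at h
            subst h
            exact hP.1
    · rw [valueCalGo, if_neg hP, if_neg (by
        intro hall
        exact hP (hall c (List.mem_cons_self)).2)]

lemma valueCal_spec_pos (w s : String) (h : ¬ keyErr w.toList s.toList)
    (hb : buildable w.toList s.toList) :
    valueCal w s = some (true, valW w.toList) := by
  rw [valueCal, go_spec s.toList w.toList h w.toList 0 [] (by simp) (by simp)]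
  rw [if_pos (by
    intro c hc
    obtain ⟨h1, h2⟩ := hb c hc
    refine ⟨h1, h2, ?_⟩
    have : 0 < s.toList.count c := lt_of_lt_of_le (List.count_pos_iff.2 hc) h2
    exact List.count_pos_iff.1 this)]
  simp [valW]

lemma valueCal_spec_neg (w s : String) (h : ¬ keyErr w.toList s.toList)
    (hb : ¬ buildable w.toList s.toList) :
    valueCal w s = some (false, 0) := by
  rw [valueCal, go_spec s.toList w.toList h w.toList 0 [] (by simp) (by simp)]
  rw [if_neg (by
    intro hall
    exact hb fun c hc => ⟨(hall c hc).1, (hall c hc).2.1⟩)]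

-- ---- B side: the counter check characterised ----
lemma checkNeed_spec (avail : PySem.Dict Char Int) :
    ∀ (items : List (Char × Int)) (total : Int),
      checkNeed avail items total =
        if (∀ p ∈ items, wordToValue.contains p.1 = true ∧ p.2 ≤ avail.getD p.1 0)
        then some (total + (items.map (fun p => tv p.1 * p.2)).sum) else none := by
  intro items
  induction items with
  | nil => intro total; simp [checkNeed]
  | cons p rest ih =>
    obtain ⟨c, k⟩ := p
    intro total
    by_cases h : wordToValue.contains c = false ∨ avail.getD c 0 < k
    · rw [checkNeed, if_pos h, if_neg (by
        intro hall
        obtain ⟨h1, h2⟩ := hall (c, k) List.mem_cons_self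
        rcases h with h | h
        · rw [h1] at h; simp at h
        · simp only at h1 h2; omega)]
    · rw [checkNeed, if_neg h, ih]
      push_neg at h
      obtain ⟨h1, h2⟩ := h
      have h1 : wordToValue.contains c = true := by simpa using h1
      have h2 : k ≤ avail.getD c 0 := by omega
      by_cases hrest : ∀ p ∈ rest, wordToValue.contains p.1 = true ∧ p.2 ≤ avail.getD p.1 0
      · rw [if_pos hrest, if_pos (by
          intro q hq
          rcases List.mem_cons.1 hq with hq | hq
          · subst hq; exact ⟨h1, h2⟩
          · exact hrest q hq)]
        simp [tv, add_assoc]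
      · rw [if_neg hrest, if_neg (by
          intro hall; exact hrest fun q hq => hall q (List.mem_cons_of_mem _ hq))]

lemma sum_tv_count (ws : List Char) (c : Char) :
    (ws.map tv).sum = tv c * ws.count c + ((ws.filter (fun x => decide (x ≠ c))).map tv).sum := by
  induction ws with
  | nil => simp
  | cons x ws ih =>
    by_cases hx : x = c
    · subst hx
      simp only [List.map_cons, List.sum_cons, List.count_cons_self, List.filter_cons]
      simp only [ne_eq, not_true_eq_false, decide_false]
      push_cast
      rw [ih]; ring
    · simp only [List.map_cons, List.sum_cons, List.filter_cons]
      rw [List.count_cons_of_ne hx]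
      simp only [ne_eq, hx, not_false_eq_true, decide_true, if_true, List.map_cons, List.sum_cons]
      rw [ih]; ring

lemma sum_tv_dedup_gen :
    ∀ (l ws : List Char), l.Nodup → (∀ c, c ∈ l ↔ c ∈ ws) →
      (l.map (fun c => tv c * (ws.count c : Int))).sum = (ws.map tv).sum := by
  intro l
  induction l with
  | nil =>
    intro ws _ hmem
    have : ws = [] := by
      cases ws with
      | nil => rfl
      | cons x t => exact absurd ((hmem x).2 List.mem_cons_self) (List.not_mem_nil)
    subst this; simp
  | cons c l ih =>
    intro ws hnd hmem
    have hcl : c ∉ l := (List.nodup_cons.1 hnd).1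
    have hnd' : l.Nodup := (List.nodup_cons.1 hnd).2
    simp only [List.map_cons, List.sum_cons]
    have hmem' : ∀ x, x ∈ l ↔ x ∈ ws.filter (fun y => decide (y ≠ c)) := by
      intro x
      rw [List.mem_filter]
      constructor
      · intro hx
        have hxc : x ≠ c := fun h => hcl (h ▸ hx)
        exact ⟨(hmem x).1 (List.mem_cons_of_mem _ hx), by simp [hxc]⟩
      · rintro ⟨hx, hxc⟩
        simp only [ne_eq, decide_eq_true_eq] at hxc
        rcases List.mem_cons.1 ((hmem x).2 hx) with h | h
        · exact absurd h hxc
        · exact h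
    have hcount : ∀ x ∈ l, ws.count x = (ws.filter (fun y => decide (y ≠ c))).count x := by
      intro x hx
      have hxc : x ≠ c := fun h => hcl (h ▸ hx)
      rw [List.count_filter (by simp [hxc])]
    rw [List.map_congr_left (fun x hx => by rw [hcount x hx]), ih _ hnd' hmem']
    rw [sum_tv_count ws c]

lemma bValue_spec_pos (w s : String) (hb : buildable w.toList s.toList) :
    checkNeed (countChars s.toList) (countChars w.toList).items 0 =
      some (valW w.toList) := by
  have hw : countChars w.toList = PySem.Dict.counter w.toList :=
    PySem.Dict.foldl_insert_getD_add_one_eq_counter _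
  have hs : countChars s.toList = PySem.Dict.counter s.toList :=
    PySem.Dict.foldl_insert_getD_add_one_eq_counter _
  rw [hw, hs, checkNeed_spec, PySem.Dict.items_counter]
  rw [if_pos (by
    intro p hp
    obtain ⟨c, hc, rfl⟩ := List.mem_map.1 hp
    have hcw : c ∈ w.toList := (PySem.Set.mem_ofList _ _).1 hc
    obtain ⟨h1, h2⟩ := hb c hcw
    refine ⟨by rw [contains_wordToValue, h1], ?_⟩
    rw [PySem.Dict.getD_counter]
    simp only
    exact_mod_cast h2)]
  rw [zero_add, List.map_map]
  have := sum_tv_dedup_gen (PySem.Set.ofList w.toList) w.toList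
    (PySem.Set.nodup_ofList _) (fun c => PySem.Set.mem_ofList _ _)
  simpa [valW, Function.comp] using this

lemma bValue_spec_neg (w s : String) (hb : ¬ buildable w.toList s.toList) :
    checkNeed (countChars s.toList) (countChars w.toList).items 0 = none := by
  have hw : countChars w.toList = PySem.Dict.counter w.toList :=
    PySem.Dict.foldl_insert_getD_add_one_eq_counter _
  have hs : countChars s.toList = PySem.Dict.counter s.toList :=
    PySem.Dict.foldl_insert_getD_add_one_eq_counter _
  rw [hw, hs, checkNeed_spec, PySem.Dict.items_counter]
  rw [if_neg (by
    intro hall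
    apply hb
    intro c hc
    have hcS : c ∈ PySem.Set.ofList w.toList := (PySem.Set.mem_ofList _ _).2 hc
    obtain ⟨h1, h2⟩ := hall (c, (w.toList.count c : Int)) (List.mem_map.2 ⟨c, hcS, rfl⟩)
    rw [contains_wordToValue] at h1
    rw [PySem.Dict.getD_counter] at h2
    simp only at h2
    exact ⟨h1, by exact_mod_cast h2⟩)]

-- ---- stability of the reverse sort on the maximal class ----
lemma insertBy_pairwise (x : String × Int) (ys : List (String × Int))
    (h : ys.Pairwise (fun a b => b.2 ≤ a.2)) :
    (PySem.List.insertBy (fun a b => decide (b.2 < a.2)) x ys).Pairwise (fun a b => b.2 ≤ a.2) := by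
  induction ys with
  | nil => simp [PySem.List.insertBy]
  | cons y ys ih =>
    rw [PySem.List.insertBy]
    obtain ⟨hy, hys⟩ := List.pairwise_cons.1 h
    by_cases hb : y.2 < x.2
    · rw [if_pos (by simpa using hb)]
      refine List.pairwise_cons.2 ⟨?_, h⟩
      intro z hz
      rcases List.mem_cons.1 hz with rfl | hz
      · exact le_of_lt hb
      · exact le_trans (hy z hz) (le_of_lt hb)
    · rw [if_neg (by simpa using hb)]
      refine List.pairwise_cons.2 ⟨?_, ih hys⟩
      intro z hz
      rcases (PySem.List.mem_insertBy _ _ _ _).1 hz with rfl | hz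
      · omega
      · exact hy z hz

lemma insertBy_filter_max (x : String × Int) (ys : List (String × Int)) (m : Int)
    (h : ys.Pairwise (fun a b => b.2 ≤ a.2)) (hub : ∀ p ∈ ys, p.2 ≤ m) (hx : x.2 ≤ m) :
    (PySem.List.insertBy (fun a b => decide (b.2 < a.2)) x ys).filter (fun p => p.2 == m) =
      ys.filter (fun p => p.2 == m) ++ if x.2 == m then [x] else [] := by
  induction ys with
  | nil => by_cases hxm : x.2 = m <;> simp [PySem.List.insertBy, hxm]
  | cons y ys ih =>
    rw [PySem.List.insertBy]
    obtain ⟨hy, hys⟩ := List.pairwise_cons.1 h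
    by_cases hb : y.2 < x.2
    · rw [if_pos (by simpa using hb)]
      have hym : y.2 ≠ m := by
        intro he; rw [he] at hb; omega
      have hysm : ∀ z ∈ ys, z.2 ≠ m := by
        intro z hz he
        have := hy z hz
        omega
      have hfilnil : (y :: ys).filter (fun p => p.2 == m) = [] := by
        rw [List.filter_eq_nil_iff]
        intro z hz
        rcases List.mem_cons.1 hz with rfl | hz
        · simp [hym]
        · simp [hysm z hz]
      rw [List.filter_cons]
      by_cases hxm : x.2 = m
      · simp only [hxm, beq_self_eq_true, if_true, hfilnil]
        simp [hxm]
      · have : x.2 ≤ y.2 ∨ x.2 < m := by omega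
        simp only [beq_iff_eq, hxm, if_false]
        rw [hfilnil]
        simp [hxm]
    · rw [if_neg (by simpa using hb)]
      rw [List.filter_cons, List.filter_cons, ih hys (fun z hz => hub z (List.mem_cons_of_mem _ hz))]
      by_cases hym : y.2 = m <;> simp [hym]

lemma foldl_insertBy_filter_max (m : Int) :
    ∀ (l acc : List (String × Int)),
      acc.Pairwise (fun a b => b.2 ≤ a.2) → (∀ p ∈ acc, p.2 ≤ m) → (∀ p ∈ l, p.2 ≤ m) →
      (l.foldl (fun acc x => PySem.List.insertBy (fun a b => decide (b.2 < a.2)) x acc) acc).filter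
          (fun p => p.2 == m) =
        acc.filter (fun p => p.2 == m) ++ l.filter (fun p => p.2 == m) := by
  intro l
  induction l with
  | nil => intro acc _ _ _; simp
  | cons x rest ih =>
    intro acc hpw hub hl
    have hub' : ∀ p ∈ PySem.List.insertBy (fun a b => decide (b.2 < a.2)) x acc, p.2 ≤ m := by
      intro p hp
      rcases (PySem.List.mem_insertBy _ _ _ _).1 hp with h | hp
      · rw [h]; exact hl x List.mem_cons_self
      · exact hub p hp
    have hih := ih (PySem.List.insertBy (fun a b => decide (b.2 < a.2)) x acc)
      (insertBy_pairwise x acc hpw) hub' (fun p hp => hl p (List.mem_cons_of_mem _ hp))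
    rw [List.foldl_cons, hih, insertBy_filter_max x acc m hpw hub (hl x List.mem_cons_self),
        List.filter_cons]
    by_cases hxm : x.2 = m <;> simp [hxm]

lemma sorted_rev_filter_max (l : List (String × Int)) (m : Int) (hub : ∀ p ∈ l, p.2 ≤ m) :
    (PySem.List.sorted l (fun p => p.2) true).filter (fun p => p.2 == m) =
      l.filter (fun p => p.2 == m) := by
  rw [PySem.List.sorted_rev_eq_foldl_insertBy]
  rw [foldl_insertBy_filter_max m l [] (by simp) (by simp) hub]
  simp

-- inserting the value already stored is a no-op
lemma insert_same_value (d : PySem.Dict String Int) (w : String) (v : Int)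
    (hn : d.keys.Nodup) (h : d.get? w = some v) : d.insert w v = d := by
  apply PySem.Dict.ext
  have hc : d.contains w = true := by
    rw [PySem.Dict.contains_eq_isSome_get?, h]; rfl
  rw [PySem.Dict.items_insert_of_contains d v hc]
  have : ∀ p ∈ d.items, (if (p.1 == w) = true then (w, v) else p) = p := by
    intro p hp
    obtain ⟨p1, p2⟩ := p
    by_cases hpw : p1 = w
    · have : d.get? p1 = some p2 := PySem.Dict.get?_of_mem_items d hp hn
      rw [hpw, h] at this
      have hv : p2 = v := by injection this with h'; omega
      simp [hpw, hv]
    · simp [hpw]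
  rw [List.map_congr_left this]
  simp

-- ---- the final extraction agrees with B's running state ----
lemma finalizeA_spec (d : PySem.Dict String Int) (best : Option Int) (bw : List String)
    (h4 : best = none → d.items = [] ∧ bw = [])
    (h5 : ∀ b, best = some b → (∀ p ∈ d.items, p.2 ≤ b) ∧ (∃ p ∈ d.items, p.2 = b) ∧
          bw = (d.items.filter (fun p => p.2 == b)).map (fun p => p.1)) :
    finalizeA d = match best with
                  | none => (none, none)
                  | some b => (some bw, some b) := by
  cases best with
  | none =>
    obtain ⟨hi, _⟩ := h4 rfl
    simp [finalizeA, hi]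
  | some b =>
    obtain ⟨hub, ⟨p, hp, hpb⟩, hbw⟩ := h5 b rfl
    have hne : d.items ≠ [] := by
      intro h; rw [h] at hp; exact List.not_mem_nil hp
    rw [finalizeA, if_neg hne]
    have hsne : PySem.List.sorted d.items (fun p => p.2) true ≠ [] := by
      rw [Ne, PySem.List.sorted_eq_nil_iff]; exact hne
    cases hs : PySem.List.sorted d.items (fun p => p.2) true with
    | nil => exact absurd hs hsne
    | cons q t =>
      obtain ⟨w0, m⟩ := q
      have hub' : ∀ y ∈ d.items, y.2 ≤ m :=
        PySem.List.key_head_sorted_rev_ge d.items (fun p => p.2) hs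
      have hmb : m = b := by
        have h1 : m ≤ b := by
          have : (w0, m) ∈ d.items := by
            rw [← PySem.List.mem_sorted d.items (fun p => p.2) true, hs]
            exact List.mem_cons_self
          exact hub _ this
        have h2 : b ≤ m := hpb ▸ hub' p hp
        omega
      subst hmb
      have hfil : ((w0, m) :: t).filter (fun p => p.2 == m) = d.items.filter (fun p => p.2 == m) := by
        rw [← hs]; exact sorted_rev_filter_max d.items m hub'
      show (some ((((w0, m) :: t).filter (fun p => p.2 == m)).map (fun p => p.1)), some m) = _
      rw [hfil, ← hbw]

-- ---- the main bisimulation ----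
lemma go_bisim (s : String) :
    ∀ (ws : List String) (d : PySem.Dict String Int) (seen : PySem.Set String)
      (best : Option Int) (bw : List String),
      (∀ w ∈ ws, ¬ keyErr w.toList s.toList) →
      d.keys.Nodup →
      (∀ w ∈ d.keys, w ∈ seen ∧ buildable w.toList s.toList) →
      (∀ w ∈ seen, buildable w.toList s.toList → d.get? w = some (valW w.toList)) →
      (best = none → d.items = [] ∧ bw = []) →
      (∀ b, best = some b → (∀ p ∈ d.items, p.2 ≤ b) ∧ (∃ p ∈ d.items, p.2 = b) ∧
            bw = (d.items.filter (fun p => p.2 == b)).map (fun p => p.1)) →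
      ∃ d', loopDic ws s d = some d' ∧
            finalizeA d' = loopAltGo (countChars s.toList) ws seen best bw := by
  intro ws
  induction ws with
  | nil =>
    intro d seen best bw _ _ _ _ h4 h5
    refine ⟨d, rfl, ?_⟩
    rw [finalizeA_spec d best bw h4 h5]
    cases best <;> rfl
  | cons w rest ih =>
    intro d seen best bw hkey hnd h2 h3 h4 h5
    have hkw : ¬ keyErr w.toList s.toList := hkey w List.mem_cons_self
    have hkrest : ∀ x ∈ rest, ¬ keyErr x.toList s.toList :=
      fun x hx => hkey x (List.mem_cons_of_mem _ hx)
    rw [loopDic, loopAltGo]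
    by_cases hseen : w ∈ seen
    · rw [if_pos hseen]
      by_cases hb : buildable w.toList s.toList
      · rw [valueCal_spec_pos w s hkw hb]
        show (∃ d', loopDic rest s (d.insert w (valW w.toList)) = some d' ∧ _)
        rw [insert_same_value d w (valW w.toList) hnd (h3 w hseen hb)]
        exact ih d seen best bw hkrest hnd h2 h3 h4 h5
      · rw [valueCal_spec_neg w s hkw hb]
        exact ih d seen best bw hkrest hnd h2 h3 h4 h5
    · rw [if_neg hseen]
      by_cases hb : buildable w.toList s.toList
      · rw [valueCal_spec_pos w s hkw hb, bValue_spec_pos w s hb]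
        have hwk : w ∉ d.keys := fun h => hseen (h2 w h).1
        have hcont : d.contains w = false := by
          cases hc : d.contains w
          · rfl
          · exact absurd ((PySem.Dict.contains_iff_mem_keys d w).1 hc) hwk
        have hitems := PySem.Dict.items_insert_of_not_contains d (valW w.toList) hcont
        have hkeys := PySem.Dict.keys_insert_of_not_contains d (valW w.toList) hcont
        have hnd' : (d.insert w (valW w.toList)).keys.Nodup := by
          rw [hkeys]
          apply List.Nodup.append hnd (by simp)
          intro a ha hw'
          simp at hw'
          subst hw'
          exact hwk ha
        have h2' : ∀ x ∈ (d.insert w (valW w.toList)).keys,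
            x ∈ PySem.Set.add seen w ∧ buildable x.toList s.toList := by
          rw [hkeys]
          intro x hx
          rcases List.mem_append.1 hx with hx | hx
          · obtain ⟨hx1, hx2⟩ := h2 x hx
            exact ⟨(PySem.Set.mem_add seen w x).2 (Or.inl hx1), hx2⟩
          · simp at hx; subst hx
            exact ⟨(PySem.Set.mem_add _ _ _).2 (Or.inr rfl), hb⟩
        have h3' : ∀ x ∈ PySem.Set.add seen w, buildable x.toList s.toList →
            (d.insert w (valW w.toList)).get? x = some (valW x.toList) := by
          intro x hx hbx
          rcases (PySem.Set.mem_add seen w x).1 hx with hx | rfl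
          · have hxw : x ≠ w := fun h => hseen (h ▸ hx)
            rw [PySem.Dict.get?_insert_of_ne _ _ hxw]
            exact h3 x hx hbx
          · exact PySem.Dict.get?_insert_self d x (valW x.toList)
        cases best with
        | none =>
          obtain ⟨hi0, _⟩ := h4 rfl
          apply ih (d.insert w (valW w.toList)) (PySem.Set.add seen w)
            (some (valW w.toList)) [w] hkrest hnd' h2' h3' (by simp)
          intro b hb'
          injection hb' with hb'
          subst hb'
          rw [hitems, hi0]
          refine ⟨by simp, ⟨(w, valW w.toList), by simp⟩, by simp⟩
        | some b =>
          obtain ⟨hub, hex, hbw⟩ := h5 b rfl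
          show ∃ d', loopDic rest s (d.insert w (valW w.toList)) = some d' ∧
            finalizeA d' = (if valW w.toList > b then
                loopAltGo (countChars s.toList) rest (PySem.Set.add seen w) (some (valW w.toList)) [w]
              else if valW w.toList = b then
                loopAltGo (countChars s.toList) rest (PySem.Set.add seen w) (some b) (bw ++ [w])
              else loopAltGo (countChars s.toList) rest (PySem.Set.add seen w) (some b) bw)
          by_cases hgt : valW w.toList > b
          · rw [if_pos hgt]
            apply ih (d.insert w (valW w.toList)) (PySem.Set.add seen w)
              (some (valW w.toList)) [w] hkrest hnd' h2' h3' (by simp)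
            intro b' hb'
            injection hb' with hb'
            subst hb'
            rw [hitems]
            have hnilf : d.items.filter (fun p => p.2 == valW w.toList) = [] := by
              rw [List.filter_eq_nil_iff]
              intro p hp
              have := hub p hp
              simp only [beq_iff_eq]
              omega
            refine ⟨?_, ⟨(w, valW w.toList), by simp⟩, ?_⟩
            · intro p hp
              rcases List.mem_append.1 hp with hp | hp
              · have := hub p hp; omega
              · simp at hp; subst hp; simp
            · rw [List.filter_append, hnilf]
              simp
          · rw [if_neg hgt]
            by_cases heqv : valW w.toList = b
            · rw [if_pos heqv]
              apply ih (d.insert w (valW w.toList)) (PySem.Set.add seen w)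
                (some b) (bw ++ [w]) hkrest hnd' h2' h3' (by simp)
              intro b' hb'
              injection hb' with hb'
              subst hb'
              rw [hitems]
              refine ⟨?_, ?_, ?_⟩
              · intro p hp
                rcases List.mem_append.1 hp with hp | hp
                · exact hub p hp
                · simp at hp; subst hp; simp [heqv]
              · obtain ⟨p, hp, hpb⟩ := hex
                exact ⟨p, List.mem_append.2 (Or.inl hp), hpb⟩
              · rw [List.filter_append]
                simp [heqv, hbw]
            · rw [if_neg heqv]
              apply ih (d.insert w (valW w.toList)) (PySem.Set.add seen w)
                (some b) bw hkrest hnd' h2' h3' (by simp)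
              intro b' hb'
              injection hb' with hb'
              subst hb'
              rw [hitems]
              refine ⟨?_, ?_, ?_⟩
              · intro p hp
                rcases List.mem_append.1 hp with hp | hp
                · exact hub p hp
                · simp at hp; subst hp; omega
              · obtain ⟨p, hp, hpb⟩ := hex
                exact ⟨p, List.mem_append.2 (Or.inl hp), hpb⟩
              · rw [List.filter_append]
                simp [heqv, hbw]
      · rw [valueCal_spec_neg w s hkw hb, bValue_spec_neg w s hb]
        show (∃ d', loopDic rest s d = some d' ∧ _)
        apply ih d (PySem.Set.add seen w) best bw hkrest hnd
        · intro x hx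
          obtain ⟨hx1, hx2⟩ := h2 x hx
          exact ⟨(PySem.Set.mem_add seen w x).2 (Or.inl hx1), hx2⟩
        · intro x hx hbx
          rcases (PySem.Set.mem_add seen w x).1 hx with hx | rfl
          · exact h3 x hx hbx
          · exact absurd hbx hb
        · exact h4
        · exact h5

-- ===== VERDICT (by name: the statement is the Claim_ definition above) =====
theorem loop_spec : Claim_equal_loop := by
  intro words input_set _hdom hpre
  unfold Pre_loop at hpre
  have hpre' : ∀ w ∈ words, ¬ keyErr w.toList input_set.toList := by
    intro w hw
    have h := List.all_eq_true.1 hpre w hw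
    simp only [Bool.not_eq_true'] at h
    unfold keyErr
    simp [h]
  unfold Spec_loop loop loop_alt
  obtain ⟨d', hd', hfin⟩ :=
    go_bisim input_set words PySem.Dict.empty PySem.Set.empty none []
      hpre' (by simp) (by simp) (by simp) (by intro; exact ⟨rfl, rfl⟩) (by simp)
  rw [hd', ← hfin]
  rfl
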